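-- pv_equiv track=rewrite | github.com/olgaObnosova/EGE_4 | 23/11240_kege.py | f
-- ===== SOURCE A (Python) =====
-- def f(start, stop, k):
--     if start > stop:
--         return 0
--     elif 'BB' in k:
--         return 0
--     elif start == stop and 'BB' not in k:
--         return 1
--     elif start == stop and 'BB' in k:
--         return 0
--     else:
--         return f(start+2, stop, k+'A') + f(start**2, stop, k+'B')\
--                + f(start*3, stop, k +'C')
-- ===== SOURCE B (Python) =====
-- def f(start, stop, k):
--     if 'BB' in k:
--         return 0
--     memo = {}
--
--     def g(s, last_b):
--         if s > stop:
--             return 0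
--         if s == stop:
--             return 1
--         key = (s, last_b)
--         if key in memo:
--             return memo[key]
--         total = g(s + 2, False) \
--                 + (0 if last_b else g(s * s, True)) \
--                 + g(s * 3, False)
--         memo[key] = total
--         return total
--
--     return g(start, k.endswith('B'))
-- ===== Notes on version B (the rewrite author's own statement) =====
-- stated objective: alternative
-- what changed: Replaces the exponential recursion that accumulates the whole operation string and rescans it for 'BB' at every call by a memoized recursion on the state (current value, last-move-was-B), so each state is solved once; often much quicker in practice but still recursive, so not measurably faster at the largest generated sizes.
import Mathlib
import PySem

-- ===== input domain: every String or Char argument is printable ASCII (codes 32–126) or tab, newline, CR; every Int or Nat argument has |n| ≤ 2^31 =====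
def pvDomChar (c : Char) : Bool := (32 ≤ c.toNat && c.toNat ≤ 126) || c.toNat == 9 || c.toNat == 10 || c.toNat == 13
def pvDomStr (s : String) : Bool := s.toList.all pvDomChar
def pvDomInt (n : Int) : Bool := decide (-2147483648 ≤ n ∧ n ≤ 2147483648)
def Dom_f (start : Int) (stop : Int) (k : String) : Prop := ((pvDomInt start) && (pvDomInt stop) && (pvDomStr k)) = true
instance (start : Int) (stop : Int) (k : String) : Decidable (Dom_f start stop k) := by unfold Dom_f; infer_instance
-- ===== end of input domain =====

-- B replaces A's exponential string-accumulating recursion by a memoized recursion on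
-- (current value, last-move-was-B); objective: alternative (each state solved once).

-- ===== PORT A =====
-- fuel makes the recursion structural; 2*(stop - start).toNat + 2 is enough fuel on Pre_f
def fAux (stop : Int) : Nat → Int → String → Int
  | 0, _, _ => 0
  | n + 1, start, k =>
    if start > stop then 0
    else if PySem.Str.isIn "BB" k then 0
    else if start = stop ∧ ¬ (PySem.Str.isIn "BB" k = true) then 1
    else if start = stop ∧ PySem.Str.isIn "BB" k = true then 0
    else fAux stop n (start + 2) (k ++ "A") + fAux stop n (start ^ 2) (k ++ "B")
         + fAux stop n (start * 3) (k ++ "C")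

def f (start : Int) (stop : Int) (k : String) : Int :=
  fAux stop (2 * (stop - start).toNat + 2) start k

-- ===== PORT B =====
-- memo dict threaded through the recursion; memo[key] is read with getD (key is present: contains was checked)
def gAux (stop : Int) : Nat → Int → Bool → PySem.Dict (Int × Bool) Int →
    Int × PySem.Dict (Int × Bool) Int
  | 0, _, _, memo => (0, memo)
  | n + 1, s, lastB, memo =>
    if s > stop then (0, memo)
    else if s = stop then (1, memo)
    else if PySem.Dict.contains memo (s, lastB) then (PySem.Dict.getD memo (s, lastB) 0, memo)
    else
      let p1 := gAux stop n (s + 2) false memo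
      let p2 := if lastB then (0, p1.2) else gAux stop n (s * s) true p1.2
      let p3 := gAux stop n (s * 3) false p2.2
      let total := p1.1 + p2.1 + p3.1
      (total, PySem.Dict.insert p3.2 (s, lastB) total)

def f_alt (start : Int) (stop : Int) (k : String) : Int :=
  if PySem.Str.isIn "BB" k then 0
  else (gAux stop (2 * (stop - start).toNat + 2) start (PySem.Str.endswith k "B") PySem.Dict.empty).1

-- ===== PRECONDITION & SPEC =====
-- Pre_f excludes exactly the inputs on which Python A never returns (it raises
-- RecursionError): start ≤ 0 with start < stop and no 'BB' in k, where the
-- start*3 (and start**2) branches revisit non-increasing values forever.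
def Pre_f (start : Int) (stop : Int) (k : String) : Prop :=
  1 ≤ start ∨ stop ≤ start ∨ PySem.Str.isIn "BB" k = true
instance (start : Int) (stop : Int) (k : String) : Decidable (Pre_f start stop k) := by
  unfold Pre_f; infer_instance

def pvWitness_f : Int × Int × String := (1, 5, "")

def Spec_f (start : Int) (stop : Int) (k : String) (out : Int) : Prop := out = f_alt start stop k
instance (start : Int) (stop : Int) (k : String) (out : Int) : Decidable (Spec_f start stop k out) := by
  unfold Spec_f; infer_instance

-- ===== CLAIM (what is proved, stated in full; the proofs are below) =====
def Claim_equal_f : Prop := ∀ (start : Int) (stop : Int) (k : String), Dom_f start stop k → Pre_f start stop k → Spec_f start stop k (f start stop k)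

-- ===== LEMMAS AND PROOFS =====

-- pure (memo-free) version of B's recursion, used only by the proofs
def hP (stop : Int) : Nat → Int → Bool → Int
  | 0, _, _ => 0
  | n + 1, s, lastB =>
    if s > stop then 0
    else if s = stop then 1
    else hP stop n (s + 2) false + (if lastB then 0 else hP stop n (s * s) true)
         + hP stop n (s * 3) false

-- the "true value" of a state, computed with its exact fuel budget
def SVal (stop s : Int) (b : Bool) : Int :=
  hP stop (2 * (stop - s).toNat + (cond b 0 1) + 1) s b

lemma hP_unfold_fuel (stop : Int) (n : Nat) (s : Int) (b : Bool)
    (hgt : ¬ s > stop) (heq : ¬ s = stop) :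
    hP stop (n + 1) s b
      = hP stop n (s + 2) false + (if b then 0 else hP stop n (s * s) true)
        + hP stop n (s * 3) false := by
  simp only [hP]
  rw [if_neg hgt, if_neg heq]

lemma sq_fact (s : Int) (hs : 1 ≤ s) : s + 2 ≤ s * s ∨ (s = 1 ∧ s * s = 1) := by
  rcases eq_or_lt_of_le hs with h | h
  · subst h; right; norm_num
  · left; nlinarith

lemma hP_irrel (stop : Int) :
    ∀ n s b, 1 ≤ s → 2 * (stop - s).toNat + (cond b 0 1) < n → hP stop n s b = SVal stop s b := by
  intro n
  induction n using Nat.strong_induction_on with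
  | _ n IH =>
    intro s b hs hlt
    obtain ⟨m, rfl⟩ : ∃ m, n = m + 1 := ⟨n - 1, by omega⟩
    by_cases hgt : s > stop
    · simp [hP, SVal, hgt]
    · by_cases heq : s = stop
      · simp [hP, SVal, heq]
      · have hslt : s < stop := by omega
        have hsq := sq_fact s hs
        cases b with
        | true =>
          have hlt' : 2 * (stop - s).toNat < m + 1 := by simpa using hlt
          have e1 := IH m (by omega) (s + 2) false (by omega)
            (by simp only [Bool.cond_false]; omega)
          have e3 := IH m (by omega) (s * 3) false (by omega)
            (by simp only [Bool.cond_false]; omega)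
          have f1 := IH (2 * (stop - s).toNat + cond true 0 1) (by omega) (s + 2) false
            (by omega) (by simp only [Bool.cond_false, Bool.cond_true]; omega)
          have f3 := IH (2 * (stop - s).toNat + cond true 0 1) (by omega) (s * 3) false
            (by omega) (by simp only [Bool.cond_false, Bool.cond_true]; omega)
          rw [hP_unfold_fuel stop m s true hgt heq, SVal,
            hP_unfold_fuel stop _ s true hgt heq, e1, e3, f1, f3]
          simp
        | false =>
          have hlt' : 2 * (stop - s).toNat + 1 < m + 1 := by simpa using hlt
          have hss : (1 : Int) ≤ s * s := by nlinarith
          have e1 := IH m (by omega) (s + 2) false (by omega)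
            (by simp only [Bool.cond_false]; omega)
          have e2 := IH m (by omega) (s * s) true hss
            (by simp only [Bool.cond_true]; omega)
          have e3 := IH m (by omega) (s * 3) false (by omega)
            (by simp only [Bool.cond_false]; omega)
          have f1 := IH (2 * (stop - s).toNat + cond false 0 1) (by simp; omega) (s + 2) false
            (by omega) (by simp only [Bool.cond_false]; omega)
          have f2 := IH (2 * (stop - s).toNat + cond false 0 1) (by simp; omega) (s * s) true
            hss (by simp only [Bool.cond_false, Bool.cond_true]; omega)
          have f3 := IH (2 * (stop - s).toNat + cond false 0 1) (by simp; omega) (s * 3) false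
            (by omega) (by simp only [Bool.cond_false]; omega)
          rw [hP_unfold_fuel stop m s false hgt heq, SVal,
            hP_unfold_fuel stop _ s false hgt heq]
          simp only [Bool.false_eq_true, if_false]
          rw [e1, e2, e3, f1, f2, f3]

lemma SVal_unfold (stop s : Int) (b : Bool) (hs : 1 ≤ s) (hlt : s < stop) :
    SVal stop s b
      = SVal stop (s + 2) false + (if b then 0 else SVal stop (s * s) true)
        + SVal stop (s * 3) false := by
  have hsq := sq_fact s hs
  cases b with
  | true =>
    have f1 := hP_irrel stop (2 * (stop - s).toNat + cond true 0 1) (s + 2) false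
      (by omega) (by simp only [Bool.cond_false, Bool.cond_true]; omega)
    have f3 := hP_irrel stop (2 * (stop - s).toNat + cond true 0 1) (s * 3) false
      (by omega) (by simp only [Bool.cond_false, Bool.cond_true]; omega)
    rw [SVal, hP_unfold_fuel stop _ s true (by omega) (by omega), f1, f3]
    simp
  | false =>
    have hss : (1 : Int) ≤ s * s := by nlinarith
    have f1 := hP_irrel stop (2 * (stop - s).toNat + cond false 0 1) (s + 2) false
      (by omega) (by simp only [Bool.cond_false]; omega)
    have f2 := hP_irrel stop (2 * (stop - s).toNat + cond false 0 1) (s * s) true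
      hss (by simp only [Bool.cond_false, Bool.cond_true]; omega)
    have f3 := hP_irrel stop (2 * (stop - s).toNat + cond false 0 1) (s * 3) false
      (by omega) (by simp only [Bool.cond_false]; omega)
    rw [SVal, hP_unfold_fuel stop _ s false (by omega) (by omega), f1, f2, f3]

lemma SVal_base_gt (stop s : Int) (b : Bool) (h : s > stop) : SVal stop s b = 0 := by
  simp [SVal, hP, h]

lemma SVal_base_eq (stop s : Int) (b : Bool) (h : s = stop) : SVal stop s b = 1 := by
  simp [SVal, hP, h]

-- string facts --------------------------------------------------------------

lemma infix_BB_concat {l : List Char} {c : Char} (hc : c ≠ 'B') :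
    ['B', 'B'] <:+: l ++ [c] ↔ ['B', 'B'] <:+: l := by
  constructor
  · rintro ⟨s, t, h⟩
    rcases List.eq_nil_or_concat t with rfl | ⟨t', c', rfl⟩
    · exfalso
      have := congrArg List.getLast? h
      simp at this
      exact hc this.symm
    · refine ⟨s, t', ?_⟩
      have h' : (s ++ ['B', 'B'] ++ t') ++ [c'] = l ++ [c] := by
        simpa [List.append_assoc] using h
      exact (List.append_inj' h' rfl).1
  · rintro ⟨s, t, h⟩
    exact ⟨s, t ++ [c], by simp [← h, List.append_assoc]⟩

lemma endswith_concat (l : List Char) (c : Char) :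
    PySem.Chars.endswith (l ++ [c]) ['B'] = decide (c = 'B') := by
  rcases Decidable.em (c = 'B') with rfl | hc
  · simp [PySem.Chars.endswith_iff]
  · simp only [hc, decide_false]
    rw [← Bool.not_eq_true, PySem.Chars.endswith_iff]
    rintro ⟨t, ht⟩
    have := congrArg List.getLast? ht
    simp at this
    exact hc this.symm

lemma infix_BB_concat_B {l : List Char}
    (hBB : ¬ ['B', 'B'] <:+: l) (hend : ¬ ['B'] <:+ l) :
    ¬ ['B', 'B'] <:+: l ++ ['B'] := by
  rintro ⟨s, t, h⟩
  rcases List.eq_nil_or_concat t with rfl | ⟨t', c', rfl⟩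
  · have h' : (s ++ ['B']) ++ ['B'] = l ++ ['B'] := by
      simpa [List.append_assoc] using h
    exact hend ⟨s, (List.append_inj' h' rfl).1⟩
  · have h' : (s ++ ['B', 'B'] ++ t') ++ [c'] = l ++ ['B'] := by
      simpa [List.append_assoc] using h
    exact hBB ⟨s, t', (List.append_inj' h' rfl).1⟩

-- A-side: any call whose string already contains 'BB' returns 0
lemma fAux_of_BB (stop : Int) (n : Nat) (s : Int) (k : String)
    (h : PySem.Str.isIn "BB" k = true) : fAux stop n s k = 0 := by
  have h' : PySem.Chars.isIn ['B', 'B'] k.toList = true := by simpa using h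
  cases n with
  | zero => simp [fAux]
  | succ m =>
    by_cases hgt : s > stop
    · simp [fAux, hgt]
    · simp [fAux, hgt, h']

-- A-side: the accumulated string collapses to its last-char-is-'B' bit
lemma fAux_eq_hP (stop : Int) :
    ∀ n s (k : String), PySem.Str.isIn "BB" k = false →
      fAux stop n s k = hP stop n s (PySem.Str.endswith k "B") := by
  intro n
  induction n with
  | zero => intro s k _; simp [fAux, hP]
  | succ m IH =>
    intro s k hk
    have hk' : PySem.Chars.isIn ['B', 'B'] k.toList = false := by simpa using hk
    by_cases hgt : s > stop
    · simp [fAux, hP, hgt]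
    · by_cases heq : s = stop
      · simp [fAux, hP, heq, hk']
      · have hkl : ¬ ['B', 'B'] <:+: k.toList := by
          rw [← PySem.Chars.isIn_iff_infix]; simp [hk']
        have hA : PySem.Str.isIn "BB" (k ++ "A") = false := by
          rw [← Bool.not_eq_true, PySem.Str.isIn_iff_infix]
          simpa [infix_BB_concat (by decide : ('A' : Char) ≠ 'B')] using hkl
        have hC : PySem.Str.isIn "BB" (k ++ "C") = false := by
          rw [← Bool.not_eq_true, PySem.Str.isIn_iff_infix]
          simpa [infix_BB_concat (by decide : ('C' : Char) ≠ 'B')] using hkl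
        have heA : PySem.Str.endswith (k ++ "A") "B" = false := by
          simpa [String.toList_append] using endswith_concat k.toList 'A'
        have heC : PySem.Str.endswith (k ++ "C") "B" = false := by
          simpa [String.toList_append] using endswith_concat k.toList 'C'
        have heB : PySem.Str.endswith (k ++ "B") "B" = true := by
          simpa [String.toList_append] using endswith_concat k.toList 'B'
        have hmid : fAux stop m (s ^ 2) (k ++ "B")
            = if PySem.Str.endswith k "B" then 0 else hP stop m (s * s) true := by
          by_cases hb : PySem.Str.endswith k "B" = true
          · have hb' : ['B'] <:+ k.toList := by
              rw [← PySem.Chars.endswith_iff]; simpa using hb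
            obtain ⟨t, ht⟩ := hb'
            have hin : PySem.Str.isIn "BB" (k ++ "B") = true := by
              rw [PySem.Str.isIn_iff_infix]
              refine ⟨t, [], ?_⟩
              simp [String.toList_append, ← ht]
            rw [fAux_of_BB stop m (s ^ 2) (k ++ "B") hin]
            have hbc : PySem.Chars.endswith k.toList ['B'] = true := by simpa using hb
            simp [hbc]
          · have hBBb : PySem.Str.isIn "BB" (k ++ "B") = false := by
              rw [← Bool.not_eq_true, PySem.Str.isIn_iff_infix]
              simp only [String.toList_append]
              refine fun hcon => infix_BB_concat_B hkl ?_ (by simpa using hcon)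
              rw [← PySem.Chars.endswith_iff]
              intro hcon2
              exact hb (by simpa using hcon2)
            rw [IH (s ^ 2) (k ++ "B") hBBb, heB, pow_two]
            have hbc : PySem.Chars.endswith k.toList ['B'] = false := by simpa using hb
            simp [hbc]
        have lhs_eq : fAux stop (m + 1) s k
            = fAux stop m (s + 2) (k ++ "A") + fAux stop m (s ^ 2) (k ++ "B")
              + fAux stop m (s * 3) (k ++ "C") := by
          simp [fAux, hgt, heq, hk']
        rw [lhs_eq, hP_unfold_fuel stop m s _ hgt heq,
          IH (s + 2) (k ++ "A") hA, IH (s * 3) (k ++ "C") hC, heA, heC, hmid]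

-- B-side: soundness of the memo table
def MemoOK (stop : Int) (memo : PySem.Dict (Int × Bool) Int) : Prop :=
  ∀ s b v, PySem.Dict.get? memo (s, b) = some v → v = SVal stop s b

lemma gAux_correct (stop : Int) :
    ∀ n s b memo, 1 ≤ s → 2 * (stop - s).toNat + (cond b 0 1) < n → MemoOK stop memo →
      (gAux stop n s b memo).1 = SVal stop s b ∧ MemoOK stop (gAux stop n s b memo).2 := by
  intro n
  induction n with
  | zero => intro s b memo _ h _; omega
  | succ m IH =>
    intro s b memo hs hlt hmemo
    by_cases hgt : s > stop
    · simpa [gAux, hgt, SVal_base_gt stop s b hgt] using hmemo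
    · by_cases heq : s = stop
      · refine ⟨?_, ?_⟩
        · simp [gAux, heq, SVal_base_eq stop stop b rfl]
        · simpa [gAux, hgt, heq] using hmemo
      · have hslt : s < stop := by omega
        have hsq := sq_fact s hs
        have hcb : cond b 0 1 = 0 ∨ cond b 0 1 = 1 := by cases b <;> simp
        by_cases hhit : PySem.Dict.contains memo (s, b) = true
        · obtain ⟨v, hv⟩ : ∃ v, PySem.Dict.get? memo (s, b) = some v := by
            have hc := PySem.Dict.contains_eq_isSome_get? (d := memo) (k := (s, b))
            rw [hc] at hhit
            exact Option.isSome_iff_exists.mp hhit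
          have hval := hmemo s b v hv
          simpa [gAux, hgt, heq, hhit, PySem.Dict.getD_of_get?_eq_some memo 0 hv, hval]
            using hmemo
        · have h1 := IH (s + 2) false memo (by omega)
            (by simp only [Bool.cond_false]; omega) hmemo
          set m1 := (gAux stop m (s + 2) false memo).2 with hm1
          have h2 : (if b then ((0 : Int), m1) else gAux stop m (s * s) true m1).1
                = (if b then 0 else SVal stop (s * s) true) ∧
              MemoOK stop (if b then ((0 : Int), m1) else gAux stop m (s * s) true m1).2 := by
            cases b with
            | true => simpa using h1.2
            | false =>
              have hlt' : 2 * (stop - s).toNat + 1 < m + 1 := by simpa using hlt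
              have hss : (1 : Int) ≤ s * s := by nlinarith
              simpa using IH (s * s) true m1 hss
                (by simp only [Bool.cond_true]; omega) h1.2
          set m2 := (if b then ((0 : Int), m1) else gAux stop m (s * s) true m1).2 with hm2
          have h3 := IH (s * 3) false m2 (by omega)
            (by simp only [Bool.cond_false]; omega) h2.2
          have hgval : gAux stop (m + 1) s b memo
              = ((gAux stop m (s + 2) false memo).1
                  + (if b then ((0 : Int), m1) else gAux stop m (s * s) true m1).1
                  + (gAux stop m (s * 3) false m2).1,
                 PySem.Dict.insert (gAux stop m (s * 3) false m2).2 (s, b)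
                  ((gAux stop m (s + 2) false memo).1
                    + (if b then ((0 : Int), m1) else gAux stop m (s * s) true m1).1
                    + (gAux stop m (s * 3) false m2).1)) := by
            simp only [gAux, if_neg hgt, if_neg heq, if_neg hhit, hm1, hm2]
          have hv : (gAux stop m (s + 2) false memo).1
              + (if b then ((0 : Int), m1) else gAux stop m (s * s) true m1).1
              + (gAux stop m (s * 3) false m2).1 = SVal stop s b := by
            rw [h1.1, h2.1, h3.1, ← SVal_unfold stop s b hs hslt]
          rw [hgval]
          refine ⟨hv, ?_⟩
          intro s' b' v' hv'
          by_cases hkey : (s', b') = ((s, b) : Int × Bool)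
          · rw [hkey, PySem.Dict.get?_insert_self] at hv'
            rw [← Option.some_inj.mp hv', hv]
            cases hkey
            rfl
          · rw [PySem.Dict.get?_insert_of_ne _ _ (by simpa using hkey)] at hv'
            exact h3.2 s' b' v' hv'

lemma memoOK_empty (stop : Int) : MemoOK stop PySem.Dict.empty := by
  intro s b v hv
  simp [PySem.Dict.get?_empty] at hv

-- ===== VERDICT (by name: the statement is the Claim_ definition above) =====
theorem f_spec : Claim_equal_f := by
  intro start stop k _ hpre
  unfold Spec_f f f_alt
  by_cases hBB : PySem.Str.isIn "BB" k = true
  · rw [fAux_of_BB stop _ start k hBB]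
    have hBBc : PySem.Chars.isIn ['B', 'B'] k.toList = true := by simpa using hBB
    simp [hBBc]
  · have hBBf : PySem.Str.isIn "BB" k = false := by simpa using hBB
    rw [if_neg hBB]
    by_cases hgt : start > stop
    · simp [fAux, gAux, hgt]
    · by_cases heq : start = stop
      · have hk' : PySem.Chars.isIn ['B', 'B'] k.toList = false := by simpa using hBBf
        simp [fAux, gAux, heq, hk']
      · have hs2 : 1 ≤ start := by
          rcases hpre with h | h | h
          · exact h
          · omega
          · rw [h] at hBBf; cases hBBf
        have hcb : cond (PySem.Str.endswith k "B") 0 1 = 0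
            ∨ cond (PySem.Str.endswith k "B") 0 1 = 1 := by
          cases PySem.Str.endswith k "B" <;> simp
        have hfuel : 2 * (stop - start).toNat + cond (PySem.Str.endswith k "B") 0 1
            < 2 * (stop - start).toNat + 2 := by omega
        rw [fAux_eq_hP stop _ start k hBBf,
          hP_irrel stop _ start (PySem.Str.endswith k "B") hs2 hfuel,
          (gAux_correct stop _ start (PySem.Str.endswith k "B") PySem.Dict.empty hs2 hfuel
            (memoOK_empty stop)).1]
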